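-- pv_equiv track=rewrite | github.com/RickCarletti/P1---Dante | URIs/1973_Runtime.py | roubaCarneiro
-- ===== SOURCE A (Python) =====
-- def ePar(x):
--     return True if x % 2 is 0 else False
--
-- def roubaCarneiro(vals, pos, conhecidas=''):
--     # a = list(a)
--     lista = []
--     lista.extend(vals)
--
--     if not (pos < 0 or pos > len(lista)-1 or lista[pos] is 0):
--
--         prevV = lista[pos]
--
--         lista[pos] -= 1
--
--         if ePar(prevV):
--             return roubaCarneiro(lista, pos - 1, conhecidas + str(pos))
--         else:
--             return roubaCarneiro(lista, pos + 1, conhecidas + str(pos))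
--
--     return lista, conhecidas
-- ===== SOURCE B (Python) =====
-- def roubaCarneiro(vals, pos, conhecidas=''):
--     # Iterative walk: instead of recursing with a freshly copied, mutated list,
--     # keep a dict of per-index decrement counts and a list of visited positions,
--     # and build the final list / transcript once at the end.
--     decs = {}
--     visited = []
--     n = len(vals)
--     while 0 <= pos < n:
--         v = vals[pos] - decs.get(pos, 0)
--         if v == 0:
--             break
--         decs[pos] = decs.get(pos, 0) + 1
--         visited.append(str(pos))
--         pos += -1 if v % 2 == 0 else 1
--     return [x - decs.get(i, 0) for i, x in enumerate(vals)], conhecidas + ''.join(visited)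
-- ===== Notes on version B (the rewrite author's own statement) =====
-- stated objective: alternative
-- what changed: A recurses once per step, copying and mutating the whole list at every call; B runs an iterative loop that only tracks a dict of per-index decrement counts and a list of visited positions, and materialises the final list and transcript once at the end.
import Mathlib
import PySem

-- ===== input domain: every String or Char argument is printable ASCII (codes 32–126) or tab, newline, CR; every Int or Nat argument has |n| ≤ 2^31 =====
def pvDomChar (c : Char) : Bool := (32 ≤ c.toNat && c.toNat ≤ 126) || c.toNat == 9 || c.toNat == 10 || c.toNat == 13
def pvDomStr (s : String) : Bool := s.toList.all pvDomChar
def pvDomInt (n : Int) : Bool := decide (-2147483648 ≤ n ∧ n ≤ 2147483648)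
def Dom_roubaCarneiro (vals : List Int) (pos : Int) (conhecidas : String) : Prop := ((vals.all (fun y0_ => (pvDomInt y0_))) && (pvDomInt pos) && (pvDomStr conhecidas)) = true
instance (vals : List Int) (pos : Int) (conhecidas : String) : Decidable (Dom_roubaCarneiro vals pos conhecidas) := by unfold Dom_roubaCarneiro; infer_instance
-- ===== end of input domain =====

-- B replaces A's per-step recursion on a freshly copied mutated list by an iterative walk
-- over a dict of decrement counts, assembling the final list and transcript once (objective: alternative).
-- Both ports use fuel (vals.length+1)^2, a bound the walk never reaches (each cell is left
-- for good after at most a few alternating visits); the fuel-exhaustion branch returns the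
-- current state and the equivalence proof does not depend on the fuel being sufficient.

-- ===== PORT A =====
def ePar (x : Int) : Bool := if PySem.Int.mod x 2 == 0 then true else false

def roubaCarneiroGo : Nat → List Int → Int → String → List Int × String
  | 0, lista, _, conhecidas => (lista, conhecidas)
  | fuel+1, vals, pos, conhecidas =>
    let lista := vals
    if !(pos < 0 || pos > (lista.length : Int) - 1 || (PySem.List.pyGet? lista pos == some 0)) then
      let prevV := (PySem.List.pyGet? lista pos).getD 0
      let lista' := PySem.List.pySetD lista pos (prevV - 1)
      if ePar prevV then
        roubaCarneiroGo fuel lista' (pos - 1) (conhecidas ++ PySem.Int.toStr pos)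
      else
        roubaCarneiroGo fuel lista' (pos + 1) (conhecidas ++ PySem.Int.toStr pos)
    else
      (lista, conhecidas)

def roubaCarneiro (vals : List Int) (pos : Int) (conhecidas : String) : List Int × String :=
  roubaCarneiroGo ((vals.length + 1) * (vals.length + 1)) vals pos conhecidas

-- ===== PORT B =====
def roubaCarneiroAltGo : Nat → List Int → PySem.Dict Int Int → Int → List String → PySem.Dict Int Int × List String
  | 0, _, decs, _, visited => (decs, visited)
  | fuel+1, vals, decs, pos, visited =>
    if 0 ≤ pos && pos < (vals.length : Int) then
      let v := PySem.List.pyGetD vals pos 0 - decs.getD pos 0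
      if v == 0 then (decs, visited)
      else
        let decs' := decs.insert pos (decs.getD pos 0 + 1)
        let visited' := visited ++ [PySem.Int.toStr pos]
        roubaCarneiroAltGo fuel vals decs' (pos + (if PySem.Int.mod v 2 == 0 then -1 else 1)) visited'
    else
      (decs, visited)

def roubaCarneiro_alt (vals : List Int) (pos : Int) (conhecidas : String) : List Int × String :=
  let r := roubaCarneiroAltGo ((vals.length + 1) * (vals.length + 1)) vals PySem.Dict.empty pos []
  ((PySem.List.enumerate vals).map (fun p => p.2 - r.1.getD p.1 0),
   conhecidas ++ PySem.Str.join "" r.2)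

-- ===== PRECONDITION & SPEC =====
def Spec_roubaCarneiro (vals : List Int) (pos : Int) (conhecidas : String) (out : List Int × String) : Prop := out = roubaCarneiro_alt vals pos conhecidas
instance (vals : List Int) (pos : Int) (conhecidas : String) (out : List Int × String) : Decidable (Spec_roubaCarneiro vals pos conhecidas out) := by unfold Spec_roubaCarneiro; infer_instance

-- ===== CLAIM (what is proved, stated in full; the proofs are below) =====
def Claim_equal_roubaCarneiro : Prop := ∀ (vals : List Int) (pos : Int) (conhecidas : String), Dom_roubaCarneiro vals pos conhecidas → Spec_roubaCarneiro vals pos conhecidas (roubaCarneiro vals pos conhecidas)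

-- ===== LEMMAS AND PROOFS =====

-- the list A's recursion carries, expressed from B's state: vals decremented per the dict
def pvBuild (vals : List Int) (d : PySem.Dict Int Int) : List Int :=
  (PySem.List.enumerate vals).map (fun p => p.2 - d.getD p.1 0)

lemma pvBuild_length (vals : List Int) (d : PySem.Dict Int Int) :
    (pvBuild vals d).length = vals.length := by
  simp [pvBuild, PySem.List.length_enumerate]

lemma pvBuild_getElem (vals : List Int) (d : PySem.Dict Int Int) (k : Nat) (hk : k < vals.length) :
    (pvBuild vals d)[k]'(by simpa [pvBuild_length] using hk) = vals[k] - d.getD (k : Int) 0 := by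
  simp [pvBuild, PySem.List.getElem_enumerate]

lemma pvBuild_empty (vals : List Int) : pvBuild vals PySem.Dict.empty = vals := by
  simp [pvBuild]

lemma altGo_acc (fuel : Nat) (vals : List Int) (d : PySem.Dict Int Int) (pos : Int) (vis : List String) :
    roubaCarneiroAltGo fuel vals d pos vis =
      ((roubaCarneiroAltGo fuel vals d pos []).1, vis ++ (roubaCarneiroAltGo fuel vals d pos []).2) := by
  induction fuel generalizing d pos vis with
  | zero => simp [roubaCarneiroAltGo]
  | succ n ih =>
    simp only [roubaCarneiroAltGo]
    split
    · split
      · simp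
      · rw [ih, ih (vis := [] ++ [PySem.Int.toStr pos])]
        simp
    · simp

lemma str_join_nil : PySem.Str.join "" ([] : List String) = "" := by
  simp [PySem.Str.join]

lemma str_join_cons (s : String) (l : List String) :
    PySem.Str.join "" (s :: l) = s ++ PySem.Str.join "" l := by
  cases l <;> simp [PySem.Str.join, PySem.Chars.join_cons_cons, String.ofList_append]

lemma goA_out (n : Nat) (lista : List Int) (pos : Int) (conh : String)
    (h : pos < 0 ∨ pos > (lista.length : Int) - 1 ∨ PySem.List.pyGet? lista pos = some 0) :
    roubaCarneiroGo (n+1) lista pos conh = (lista, conh) := by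
  simp only [roubaCarneiroGo]
  rw [if_neg]
  simp only [Bool.not_eq_true', Bool.not_eq_false]
  rcases h with h | h | h <;> simp [h]

lemma goA_step (n : Nat) (lista : List Int) (pos : Int) (conh : String) (v : Int)
    (h0 : 0 ≤ pos) (hlt : pos < (lista.length : Int))
    (hz : PySem.List.pyGet? lista pos = some v) (hv : v ≠ 0) :
    roubaCarneiroGo (n+1) lista pos conh =
      roubaCarneiroGo n (PySem.List.pySetD lista pos (v - 1))
        (if ePar v then pos - 1 else pos + 1) (conh ++ PySem.Int.toStr pos) := by
  simp only [roubaCarneiroGo]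
  rw [if_pos]
  · rw [hz]
    simp only [Option.getD_some]
    by_cases hp : ePar v <;> simp [hp]
  · simp only [hz, Bool.not_eq_true', Bool.or_eq_false_iff, decide_eq_false_iff_not, not_lt,
      not_lt, beq_eq_false_iff_ne, ne_eq, Option.some.injEq]
    refine ⟨⟨by omega, by omega⟩, hv⟩

lemma goB_out (n : Nat) (vals : List Int) (d : PySem.Dict Int Int) (pos : Int) (vis : List String)
    (h : ¬ (0 ≤ pos ∧ pos < (vals.length : Int))) :
    roubaCarneiroAltGo (n+1) vals d pos vis = (d, vis) := by
  simp only [roubaCarneiroAltGo]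
  rw [if_neg]
  simp only [Bool.and_eq_true, decide_eq_true_eq]
  exact h

lemma goB_zero (n : Nat) (vals : List Int) (d : PySem.Dict Int Int) (pos : Int) (vis : List String)
    (h0 : 0 ≤ pos) (hlt : pos < (vals.length : Int))
    (hv : PySem.List.pyGetD vals pos 0 - d.getD pos 0 = 0) :
    roubaCarneiroAltGo (n+1) vals d pos vis = (d, vis) := by
  simp only [roubaCarneiroAltGo]
  rw [if_pos (by simp only [Bool.and_eq_true, decide_eq_true_eq]; exact ⟨h0, hlt⟩)]
  rw [if_pos (by simp [hv])]

lemma goB_step (n : Nat) (vals : List Int) (d : PySem.Dict Int Int) (pos : Int) (vis : List String)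
    (h0 : 0 ≤ pos) (hlt : pos < (vals.length : Int))
    (hv : PySem.List.pyGetD vals pos 0 - d.getD pos 0 ≠ 0) :
    roubaCarneiroAltGo (n+1) vals d pos vis =
      roubaCarneiroAltGo n vals (d.insert pos (d.getD pos 0 + 1))
        (pos + (if PySem.Int.mod (PySem.List.pyGetD vals pos 0 - d.getD pos 0) 2 == 0 then -1 else 1))
        (vis ++ [PySem.Int.toStr pos]) := by
  simp only [roubaCarneiroAltGo]
  rw [if_pos (by simp only [Bool.and_eq_true, decide_eq_true_eq]; exact ⟨h0, hlt⟩)]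
  rw [if_neg (by simp [hv])]

lemma go_eq (fuel : Nat) (vals : List Int) (d : PySem.Dict Int Int) (pos : Int) (conh : String) :
    roubaCarneiroGo fuel (pvBuild vals d) pos conh =
      (pvBuild vals (roubaCarneiroAltGo fuel vals d pos []).1,
       conh ++ PySem.Str.join "" (roubaCarneiroAltGo fuel vals d pos []).2) := by
  induction fuel generalizing d pos conh with
  | zero => simp [roubaCarneiroGo, roubaCarneiroAltGo, str_join_nil, String.append_empty]
  | succ n ih =>
    by_cases hin : 0 ≤ pos ∧ pos < (vals.length : Int)
    · obtain ⟨h0, hlt⟩ := hin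
      have hk : pos.toNat < vals.length := by omega
      have hpos : ((pos.toNat : Nat) : Int) = pos := Int.toNat_of_nonneg h0
      have hgetD : PySem.List.pyGetD vals pos 0 = vals[pos.toNat] :=
        PySem.List.pyGetD_eq_getElem vals 0 h0 hlt
      have hget : PySem.List.pyGet? (pvBuild vals d) pos = some (vals[pos.toNat] - d.getD pos 0) := by
        have h1 : PySem.List.pyGet? (pvBuild vals d) pos
            = some ((pvBuild vals d)[pos.toNat]'(by rw [pvBuild_length]; exact hk)) :=
          PySem.List.pyGet?_eq_some_getElem (pvBuild vals d) h0 (by rw [pvBuild_length]; exact hlt)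
        rw [h1, pvBuild_getElem vals d pos.toNat hk, hpos]
      by_cases hv : vals[pos.toNat] - d.getD pos 0 = 0
      · rw [goA_out n _ _ _ (Or.inr (Or.inr (by rw [hget, hv]))),
            goB_zero n vals d pos [] h0 hlt (by rw [hgetD]; exact hv),
            str_join_nil, String.append_empty]
      · have hset : PySem.List.pySetD (pvBuild vals d) pos (vals[pos.toNat] - d.getD pos 0 - 1)
            = pvBuild vals (d.insert pos (d.getD pos 0 + 1)) := by
          apply List.ext_getElem
          · rw [PySem.List.length_pySetD, pvBuild_length, pvBuild_length]
          · intro j hj1 hj2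
            have hj : j < vals.length := by
              rw [PySem.List.length_pySetD, pvBuild_length] at hj1; exact hj1
            simp only [PySem.List.pySetD_of_nonneg (pvBuild vals d) _ h0, List.getElem_set]
            by_cases hjk : pos.toNat = j
            · subst hjk
              rw [if_pos rfl, pvBuild_getElem vals _ pos.toNat hk, PySem.Dict.getD_insert,
                  if_pos hpos]
              omega
            · have hne : ¬ ((j : Int) = pos) := by omega
              rw [if_neg hjk, pvBuild_getElem vals d j hj,
                  pvBuild_getElem vals (d.insert pos (d.getD pos 0 + 1)) j hj,
                  PySem.Dict.getD_insert, if_neg hne]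
        rw [goA_step n _ _ _ _ h0 (by rw [pvBuild_length]; exact hlt) hget hv,
            goB_step n vals d pos [] h0 hlt (by rw [hgetD]; exact hv),
            hset]
        have hdir : (if ePar (vals[pos.toNat] - d.getD pos 0) then pos - 1 else pos + 1)
            = pos + (if PySem.Int.mod (PySem.List.pyGetD vals pos 0 - d.getD pos 0) 2 == 0 then -1 else 1) := by
          rw [hgetD]
          rcases Bool.eq_false_or_eq_true (PySem.Int.mod (vals[pos.toNat] - d.getD pos 0) 2 == 0) with hp | hp <;>
            · simp [ePar, hp]
              omega
        rw [hdir, ih, altGo_acc n vals _ _ ([] ++ [PySem.Int.toStr pos])]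
        simp only [List.nil_append]
        rw [List.singleton_append, str_join_cons, ← String.append_assoc]
    · rcases (by omega : pos < 0 ∨ pos > (vals.length : Int) - 1) with h | h
      · rw [goA_out n _ _ _ (Or.inl h), goB_out n vals d pos [] hin,
            str_join_nil, String.append_empty]
      · rw [goA_out n _ _ _ (Or.inr (Or.inl (by rw [pvBuild_length]; exact h))),
            goB_out n vals d pos [] hin, str_join_nil, String.append_empty]

-- ===== VERDICT (by name: the statement is the Claim_ definition above) =====
theorem roubaCarneiro_spec : Claim_equal_roubaCarneiro := by
  intro vals pos conh _
  unfold Spec_roubaCarneiro roubaCarneiro roubaCarneiro_alt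
  have h := go_eq ((vals.length + 1) * (vals.length + 1)) vals PySem.Dict.empty pos conh
  rw [pvBuild_empty] at h
  simpa [pvBuild] using h
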